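-- pv_equiv track=rewrite | github.com/wattaihei/ProgrammingContest | TopCoder/SRM788/level3.py | largestGCD
-- ===== SOURCE A (Python) =====
-- def largestGCD(N, A):
--     ans = 1
--     for a in range(1, 101):
--         cango = [[False]*N for _ in range(N)]
--         for i in range(N):
--             for j in range(N):
--                 if A[i*N+j] % a == 0:
--                     cango[i][j] = True
--         if not cango[0][0] or not cango[N-1][N-1]:
--             continue
--         checked = [[False]*N for _ in range(N)]
--         q = [(0, 0)]
--         checked[0][0] = True
--         while q:
--             qq = []
--             for x, y in q:
--                 if x < N-1 and cango[x+1][y] and not checked[x+1][y]: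
--                     checked[x+1][y] = True
--                     qq.append((x+1, y))
--                 if y < N-1 and cango[x][y+1] and not checked[x][y+1]:
--                     checked[x][y+1] = True
--                     qq.append((x, y+1))
--             q = qq
--         if checked[N-1][N-1]:
--             ans = a
--     return ans
-- ===== SOURCE B (Python) =====
-- def largestGCD(N, A):
--     ans = 1
--     for a in range(1, 101):
--         # single row-major DP pass: a cell is reachable iff divisible and its
--         # top or left neighbour is reachable (no BFS queue/frontier needed)
--         reach = []
--         for idx in range(N * N):
--             i, j = divmod(idx, N)
--             ok = A[idx] % a == 0 and (
--                 idx == 0 or (i > 0 and reach[idx - N]) or (j > 0 and reach[idx - 1]))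
--             reach.append(ok)
--         if reach[-1]:
--             ans = a
--     return ans
-- ===== Notes on version B (the rewrite author's own statement) =====
-- stated objective: simpler
-- what changed: Replaces the per-a BFS (frontier queue over a precomputed cango matrix plus a checked matrix) by a single row-major DP pass that folds divisibility and reachability into one flat list, so no queue, no visited matrix and no precomputed grid are maintained.
import Mathlib
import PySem

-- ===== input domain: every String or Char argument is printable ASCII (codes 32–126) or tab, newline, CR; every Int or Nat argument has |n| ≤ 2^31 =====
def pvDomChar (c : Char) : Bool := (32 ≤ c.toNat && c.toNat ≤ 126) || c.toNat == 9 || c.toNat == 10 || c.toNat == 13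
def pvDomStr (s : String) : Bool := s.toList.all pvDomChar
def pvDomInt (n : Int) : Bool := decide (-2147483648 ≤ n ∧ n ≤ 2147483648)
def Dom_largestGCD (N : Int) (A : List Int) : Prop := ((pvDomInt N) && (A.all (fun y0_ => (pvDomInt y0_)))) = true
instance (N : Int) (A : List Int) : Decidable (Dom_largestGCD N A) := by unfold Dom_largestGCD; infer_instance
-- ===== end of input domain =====

-- B replaces A's per-candidate BFS (frontier queue + cango/checked matrices) by a single
-- row-major reachability DP over one flat list; same return value on every input A accepts.

-- ===== PORT A =====
abbrev Grid := List (List Bool)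

-- m[x][y] read and `m[x][y] = True` write (row/column indices are nonnegative and,
-- on admitted inputs, in range wherever A reads/writes)
def get2 (m : Grid) (x y : Nat) : Bool := (m.getD x []).getD y false
def set2 (m : Grid) (x y : Nat) : Grid := m.set x ((m.getD x []).set y true)

-- `for j in range(N): if A[i*N+j] % a == 0: cango[i][j] = True`  (n = N.toNat = N on admitted inputs)
def cangoRow (n : Nat) (A : List Int) (a : Int) (c : Grid) (i : Nat) : Grid :=
  (List.range n).foldl (fun c j =>
    if PySem.Int.mod ((PySem.List.pyGet? A ((i * n + j : Nat) : Int)).getD 0) a = 0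
    then set2 c i j else c) c

def buildCango (n : Nat) (A : List Int) (a : Int) : Grid :=
  (List.range n).foldl (cangoRow n A a) (List.replicate n (List.replicate n false))

-- body of `for x, y in q:` — the two `if` visits of the down and right neighbours
def bfsStep (n : Nat) (cango : Grid) (st : Grid × List (Nat × Nat)) (p : Nat × Nat) :
    Grid × List (Nat × Nat) :=
  let st1 := if p.1 + 1 < n ∧ get2 cango (p.1 + 1) p.2 = true ∧ get2 st.1 (p.1 + 1) p.2 = false
    then (set2 st.1 (p.1 + 1) p.2, st.2 ++ [(p.1 + 1, p.2)]) else (st.1, st.2)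
  if p.2 + 1 < n ∧ get2 cango p.1 (p.2 + 1) = true ∧ get2 st1.1 p.1 (p.2 + 1) = false
    then (set2 st1.1 p.1 (p.2 + 1), st1.2 ++ [(p.1, p.2 + 1)]) else (st1.1, st1.2)

-- `while q:` — the fuel 2*n is a totality guard only: wave k holds only cells with
-- x+y = k ≤ 2n-2, so the queue is provably empty before the fuel runs out
def bfsLoop (n : Nat) (cango : Grid) : Nat → Grid → List (Nat × Nat) → Grid
  | 0, ch, _ => ch
  | fuel+1, ch, q =>
    if q.isEmpty then ch
    else
      let st := q.foldl (bfsStep n cango) (ch, [])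
      bfsLoop n cango fuel st.1 st.2

-- body of `for a in range(1, 101):`
def bodyA (N : Int) (A : List Int) (ans a : Int) : Int :=
  let n := N.toNat
  let cango := buildCango n A a
  if ¬ get2 cango 0 0 = true ∨ ¬ get2 cango (n - 1) (n - 1) = true then ans
  else
    let checked := set2 (List.replicate n (List.replicate n false)) 0 0
    let fin := bfsLoop n cango (2 * n) checked [(0, 0)]
    if get2 fin (n - 1) (n - 1) = true then a else ans

def largestGCD (N : Int) (A : List Int) : Int :=
  (PySem.List.pyRange 1 101 1).foldl (bodyA N A) 1

-- ===== PORT B =====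
-- body of `for idx in range(N*N):` — one DP cell: divisible AND (start, or top, or left reachable)
def altStep (n : Nat) (A : List Int) (a : Int) (r : List Bool) (idx : Nat) : List Bool :=
  let i := idx / n
  let j := idx % n
  let ok := decide (PySem.Int.mod ((PySem.List.pyGet? A ((idx : Nat) : Int)).getD 0) a = 0) &&
    ((idx == 0) || (decide (0 < i) && r.getD (idx - n) false) ||
     (decide (0 < j) && r.getD (idx - 1) false))
  r ++ [ok]

-- body of `for a in range(1, 101):`
def bodyB (N : Int) (A : List Int) (ans a : Int) : Int :=
  let n := N.toNat
  let reach := (List.range (n * n)).foldl (altStep n A a) []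
  if (PySem.List.pyGet? reach (-1)).getD false then a else ans

def largestGCD_alt (N : Int) (A : List Int) : Int :=
  (PySem.List.pyRange 1 101 1).foldl (bodyB N A) 1

-- ===== PRECONDITION & SPEC =====
-- Pre_ excludes exactly the inputs where the Python A raises (IndexError): N < 1, or A
-- shorter than the N*N grid the code reads.
def Pre_largestGCD (N : Int) (A : List Int) : Prop := 1 ≤ N ∧ N * N ≤ (A.length : Int)
instance (N : Int) (A : List Int) : Decidable (Pre_largestGCD N A) := by
  unfold Pre_largestGCD; infer_instance

def pvWitness_largestGCD : Int × List Int := (2, [2, 4, 6, 4])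

def Spec_largestGCD (N : Int) (A : List Int) (out : Int) : Prop := out = largestGCD_alt N A
instance (N : Int) (A : List Int) (out : Int) : Decidable (Spec_largestGCD N A out) := by
  unfold Spec_largestGCD; infer_instance

-- ===== CLAIM (what is proved, stated in full; the proofs are below) =====
def Claim_equal_largestGCD : Prop := ∀ (N : Int) (A : List Int), Dom_largestGCD N A → Pre_largestGCD N A → Spec_largestGCD N A (largestGCD N A)

-- ===== LEMMAS AND PROOFS =====

-- divisibility of the grid cell (i, j) by the candidate a
def gdiv (n : Nat) (A : List Int) (a : Int) (i j : Nat) : Bool :=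
  decide (PySem.Int.mod ((PySem.List.pyGet? A ((i * n + j : Nat) : Int)).getD 0) a = 0)

-- reachability of (i, j) from (0,0) by down/right moves through g-true cells
def rf (g : Nat → Nat → Bool) : Nat → Nat → Bool
  | 0, 0 => g 0 0
  | 0, j+1 => g 0 (j+1) && rf g 0 j
  | i+1, 0 => g (i+1) 0 && rf g i 0
  | i+1, j+1 => g (i+1) (j+1) && (rf g i (j+1) || rf g (i+1) j)

def WF (n : Nat) (m : Grid) : Prop := m.length = n ∧ ∀ r ∈ m, r.length = n

def Sound (n : Nat) (g : Nat → Nat → Bool) (ch : Grid) : Prop :=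
  ∀ x y, get2 ch x y = true → x < n ∧ y < n ∧ rf g x y = true

def closedAt (n : Nat) (g : Nat → Nat → Bool) (ch : Grid) (x y : Nat) : Prop :=
  (x + 1 < n → g (x + 1) y = true → get2 ch (x + 1) y = true) ∧
  (y + 1 < n → g x (y + 1) = true → get2 ch x (y + 1) = true)

def Front (ch : Grid) (q : List (Nat × Nat)) (k : Nat) : Prop :=
  ∀ p ∈ q, get2 ch p.1 p.2 = true ∧ p.1 + p.2 = k

lemma WF_set2 (n : Nat) (m : Grid) (x y : Nat) (h : WF n m) : WF n (set2 m x y) := by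
  by_cases hx : x < m.length
  · refine ⟨by simp [set2, h.1], ?_⟩
    intro r hr
    rcases List.mem_or_eq_of_mem_set hr with h1 | h1
    · exact h.2 r h1
    · subst h1
      have hrow : m.getD x [] = m[x] := by
        rw [List.getD_eq_getElem?_getD, List.getElem?_eq_getElem hx]; rfl
      rw [hrow, List.length_set]
      exact h.2 _ (List.getElem_mem hx)
  · rw [set2, List.set_eq_of_length_le (le_of_not_gt hx)]; exact h

lemma get2_set2_self (n : Nat) (m : Grid) (x y : Nat) (h : WF n m) (hx : x < n) (hy : y < n) :
    get2 (set2 m x y) x y = true := by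
  have hx' : x < m.length := by rw [h.1]; exact hx
  have hy' : y < (m[x]?.getD ([] : List Bool)).length := by
    rw [List.getElem?_eq_getElem hx']
    show y < m[x].length
    rw [h.2 _ (List.getElem_mem hx')]; exact hy
  simp only [get2, set2, List.getD_eq_getElem?_getD]
  rw [List.getElem?_set_self hx']
  simp only [Option.getD_some]
  rw [List.getElem?_set_self hy']
  rfl

lemma get2_set2_ne (m : Grid) (x y u v : Nat) (h : ¬(u = x ∧ v = y)) :
    get2 (set2 m x y) u v = get2 m u v := by
  by_cases hux : u = x
  · subst hux
    have hvy : y ≠ v := fun hv => h ⟨rfl, hv.symm⟩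
    by_cases hx : u < m.length
    · simp only [get2, set2, List.getD_eq_getElem?_getD]
      rw [List.getElem?_set_self hx]
      simp only [Option.getD_some]
      rw [List.getElem?_set_ne hvy]
    · rw [set2, List.set_eq_of_length_le (le_of_not_gt hx)]
  · simp only [get2, set2, List.getD_eq_getElem?_getD]
    rw [List.getElem?_set_ne (fun hh => hux hh.symm)]

lemma get2_set2_mono (n : Nat) (m : Grid) (x y a b : Nat) (h : WF n m) (hx : x < n) (hy : y < n)
    (hab : get2 m a b = true) : get2 (set2 m x y) a b = true := by
  by_cases hne : a = x ∧ b = y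
  · obtain ⟨rfl, rfl⟩ := hne; exact get2_set2_self n m a b h hx hy
  · rw [get2_set2_ne m x y a b hne]; exact hab

lemma closedAt_mono (n : Nat) (g : Nat → Nat → Bool) (ch ch' : Grid) (x y : Nat)
    (hmono : ∀ a b, get2 ch a b = true → get2 ch' a b = true)
    (h : closedAt n g ch x y) : closedAt n g ch' x y :=
  ⟨fun h1 h2 => hmono _ _ (h.1 h1 h2), fun h1 h2 => hmono _ _ (h.2 h1 h2)⟩

lemma WF_replicate (n : Nat) : WF n (List.replicate n (List.replicate n false)) := by
  refine ⟨by simp, ?_⟩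
  intro r hr
  rw [List.eq_of_mem_replicate hr]
  simp

lemma get2_replicate (n x y : Nat) :
    get2 (List.replicate n (List.replicate n false)) x y = false := by
  simp only [get2, List.getD_eq_getElem?_getD, List.getElem?_replicate]
  by_cases hx : x < n
  · simp only [if_pos hx, Option.getD_some]
    by_cases hy : y < n <;> simp [hy]
  · simp [hx]

lemma cangoRow_aux (n : Nat) (A : List Int) (a : Int) (i : Nat) (c : Grid)
    (hWF : WF n c) (hi : i < n) : ∀ m, m ≤ n →
    WF n ((List.range m).foldl (fun c j =>
        if PySem.Int.mod ((PySem.List.pyGet? A ((i * n + j : Nat) : Int)).getD 0) a = 0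
        then set2 c i j else c) c) ∧
    ∀ u v, get2 ((List.range m).foldl (fun c j =>
        if PySem.Int.mod ((PySem.List.pyGet? A ((i * n + j : Nat) : Int)).getD 0) a = 0
        then set2 c i j else c) c) u v =
      if u = i ∧ v < m ∧ gdiv n A a i v = true then true else get2 c u v := by
  intro m
  induction m with
  | zero =>
    intro _
    refine ⟨by simpa using hWF, ?_⟩
    intro u v
    simp
  | succ m ih =>
    intro hm
    obtain ⟨ihWF, ihget⟩ := ih (by omega)
    rw [List.range_succ, List.foldl_append, List.foldl_cons, List.foldl_nil]
    by_cases hcond : PySem.Int.mod ((PySem.List.pyGet? A ((i * n + m : Nat) : Int)).getD 0) a = 0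
    · rw [if_pos hcond]
      refine ⟨WF_set2 n _ i m ihWF, ?_⟩
      intro u v
      have hgm : gdiv n A a i m = true := by unfold gdiv; exact decide_eq_true hcond
      by_cases h1 : u = i ∧ v = m
      · obtain ⟨rfl, rfl⟩ := h1
        rw [get2_set2_self n _ u v ihWF hi (by omega)]
        rw [if_pos ⟨rfl, by omega, hgm⟩]
      · rw [get2_set2_ne _ i m u v h1, ihget u v]
        by_cases h2 : u = i ∧ v < m ∧ gdiv n A a i v = true
        · rw [if_pos h2, if_pos ⟨h2.1, by omega, h2.2.2⟩]
        · rw [if_neg h2]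
          by_cases h3 : u = i ∧ v < m + 1 ∧ gdiv n A a i v = true
          · exfalso
            obtain ⟨rfl, hv, hg⟩ := h3
            have hvm : v = m := by
              by_contra hvm
              exact h2 ⟨rfl, by omega, hg⟩
            exact h1 ⟨rfl, hvm⟩
          · rw [if_neg h3]
    · rw [if_neg hcond]
      refine ⟨ihWF, ?_⟩
      intro u v
      rw [ihget u v]
      have hgm : gdiv n A a i m = false := by unfold gdiv; exact decide_eq_false hcond
      by_cases h2 : u = i ∧ v < m ∧ gdiv n A a i v = true
      · rw [if_pos h2, if_pos ⟨h2.1, by omega, h2.2.2⟩]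
      · rw [if_neg h2]
        by_cases h3 : u = i ∧ v < m + 1 ∧ gdiv n A a i v = true
        · exfalso
          obtain ⟨rfl, hv, hg⟩ := h3
          have hvm : v = m := by
            by_contra hvm
            exact h2 ⟨rfl, by omega, hg⟩
          rw [hvm] at hg
          rw [hgm] at hg
          cases hg
        · rw [if_neg h3]

lemma WF_cangoRow (n : Nat) (A : List Int) (a : Int) (c : Grid) (i : Nat)
    (hWF : WF n c) (hi : i < n) : WF n (cangoRow n A a c i) := by
  unfold cangoRow
  exact (cangoRow_aux n A a i c hWF hi n le_rfl).1

lemma get2_cangoRow (n : Nat) (A : List Int) (a : Int) (c : Grid) (i : Nat)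
    (hWF : WF n c) (hi : i < n) (u v : Nat) :
    get2 (cangoRow n A a c i) u v =
      if u = i ∧ v < n ∧ gdiv n A a i v = true then true else get2 c u v := by
  unfold cangoRow
  exact (cangoRow_aux n A a i c hWF hi n le_rfl).2 u v

lemma buildCango_aux (n : Nat) (A : List Int) (a : Int) : ∀ m, m ≤ n →
    WF n ((List.range m).foldl (cangoRow n A a) (List.replicate n (List.replicate n false))) ∧
    ∀ u v, get2 ((List.range m).foldl (cangoRow n A a)
        (List.replicate n (List.replicate n false))) u v =
      (decide (u < m) && decide (v < n) && gdiv n A a u v) := by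
  intro m
  induction m with
  | zero =>
    refine fun _ => ⟨WF_replicate n, ?_⟩
    intro u v
    rw [List.range_zero, List.foldl_nil, get2_replicate]
    simp
  | succ m ih =>
    intro hm
    obtain ⟨ihWF, ihget⟩ := ih (by omega)
    rw [List.range_succ, List.foldl_append, List.foldl_cons, List.foldl_nil]
    have hmn : m < n := by omega
    refine ⟨WF_cangoRow n A a _ m ihWF hmn, ?_⟩
    intro u v
    rw [get2_cangoRow n A a _ m ihWF hmn u v]
    by_cases h1 : u = m ∧ v < n ∧ gdiv n A a m v = true
    · obtain ⟨rfl, hv, hg⟩ := h1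
      rw [if_pos ⟨rfl, hv, hg⟩]
      simp [hv, hg]
    · rw [if_neg h1, ihget u v]
      by_cases hu : u = m
      · subst hu
        simp only [Nat.lt_irrefl, decide_false, Bool.false_and]
        by_cases hv : v < n
        · by_cases hg : gdiv n A a u v = true
          · exact absurd ⟨rfl, hv, hg⟩ h1
          · simp [Bool.not_eq_true] at hg
            simp [hg]
        · simp [hv]
      · have hd : (decide (u < m + 1) : Bool) = decide (u < m) := by
          rcases Nat.lt_or_ge u m with hlt | hge
          · simp [hlt, Nat.lt_succ_of_lt hlt]
          · have hn1 : ¬ u < m := by omega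
            have hn2 : ¬ u < m + 1 := by omega
            simp [hn1, hn2]
        rw [hd]

lemma get2_buildCango (n : Nat) (A : List Int) (a : Int) (u v : Nat) :
    get2 (buildCango n A a) u v = (decide (u < n) && decide (v < n) && gdiv n A a u v) :=
  (buildCango_aux n A a n le_rfl).2 u v

lemma rf_g (g : Nat → Nat → Bool) (x y : Nat) (h : rf g x y = true) : g x y = true := by
  cases x <;> cases y <;> simp [rf, Bool.and_eq_true] at h <;> try exact h.1
  exact h

lemma rf_root (g : Nat → Nat → Bool) (x y : Nat) (h : rf g x y = true) : g 0 0 = true := by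
  have key : ∀ s x y, x + y = s → rf g x y = true → g 0 0 = true := by
    intro s
    induction s using Nat.strong_induction_on with
    | _ s ih =>
      intro x y hs hr
      cases x with
      | zero =>
        cases y with
        | zero => simpa [rf] using hr
        | succ j =>
          simp [rf, Bool.and_eq_true] at hr
          exact ih (0 + j) (by omega) 0 j rfl hr.2
      | succ i =>
        cases y with
        | zero =>
          simp [rf, Bool.and_eq_true] at hr
          exact ih (i + 0) (by omega) i 0 rfl hr.2
        | succ j =>
          simp [rf, Bool.and_eq_true, Bool.or_eq_true] at hr
          rcases hr.2 with h2 | h2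
          · exact ih (i + (j + 1)) (by omega) i (j + 1) rfl h2
          · exact ih ((i + 1) + j) (by omega) (i + 1) j rfl h2
  exact key (x + y) x y rfl h

lemma rf_succ_x (g : Nat → Nat → Bool) (x y : Nat) (h : rf g x y = true)
    (hg : g (x + 1) y = true) : rf g (x + 1) y = true := by
  cases y <;> simp [rf, hg, h]

lemma rf_succ_y (g : Nat → Nat → Bool) (x y : Nat) (h : rf g x y = true)
    (hg : g x (y + 1) = true) : rf g x (y + 1) = true := by
  cases x <;> simp [rf, hg, h]

-- one neighbour visit (the shape of both `if`s in bfsStep)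
-- one neighbour visit (the shape of both `if`s in bfsStep)
lemma visit_aux (n : Nat) (g : Nat → Nat → Bool) (cango : Grid)
    (hc : ∀ u v, get2 cango u v = (decide (u < n) && decide (v < n) && g u v))
    (ch : Grid) (qq : List (Nat × Nat)) (u v k : Nat) (C : Prop) [Decidable C]
    (hCuv : C → u < n ∧ v < n) (huvC : u < n → v < n → C)
    (hWF : WF n ch) (hS : Sound n g ch) (hF : Front ch qq (k + 1)) (hsum : u + v = k + 1)
    (hrf : u < n → v < n → g u v = true → rf g u v = true) :
    ∃ res : Grid × List (Nat × Nat),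
      (if C ∧ get2 cango u v = true ∧ get2 ch u v = false
        then (set2 ch u v, qq ++ [(u, v)]) else (ch, qq)) = res ∧
      WF n res.1 ∧ Sound n g res.1 ∧ Front res.1 res.2 (k + 1) ∧
      (∀ a b, get2 ch a b = true → get2 res.1 a b = true) ∧
      (∀ a b, get2 res.1 a b = true → get2 ch a b = true ∨ (a, b) ∈ res.2) ∧
      (∀ p ∈ res.2, p ∈ qq ∨ p = (u, v)) ∧
      (∀ p ∈ qq, p ∈ res.2) ∧
      (u < n → v < n → g u v = true → get2 res.1 u v = true) := by
  by_cases hif : C ∧ get2 cango u v = true ∧ get2 ch u v = false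
  · obtain ⟨hC, hcango, hchf⟩ := hif
    obtain ⟨hun, hvn⟩ := hCuv hC
    have hg : g u v = true := by
      rw [hc] at hcango
      simpa [hun, hvn] using hcango
    have hrf' := hrf hun hvn hg
    refine ⟨(set2 ch u v, qq ++ [(u, v)]), by rw [if_pos ⟨hC, hcango, hchf⟩],
      WF_set2 n ch u v hWF, ?_, ?_, ?_, ?_, ?_, ?_, ?_⟩
    · intro a b hab
      by_cases hne : a = u ∧ b = v
      · obtain ⟨rfl, rfl⟩ := hne
        exact ⟨hun, hvn, hrf'⟩
      · rw [get2_set2_ne ch u v a b hne] at hab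
        exact hS a b hab
    · intro p hp
      rcases List.mem_append.1 hp with hp | hp
      · exact ⟨get2_set2_mono n ch u v p.1 p.2 hWF hun hvn (hF p hp).1, (hF p hp).2⟩
      · have : p = (u, v) := by simpa using hp
        subst this
        exact ⟨get2_set2_self n ch u v hWF hun hvn, hsum⟩
    · exact fun a b hab => get2_set2_mono n ch u v a b hWF hun hvn hab
    · intro a b hab
      by_cases hne : a = u ∧ b = v
      · obtain ⟨rfl, rfl⟩ := hne
        right
        simp
      · rw [get2_set2_ne ch u v a b hne] at hab
        exact Or.inl hab
    · intro p hp
      rcases List.mem_append.1 hp with hp | hp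
      · exact Or.inl hp
      · exact Or.inr (by simpa using hp)
    · exact fun p hp => List.mem_append_left _ hp
    · exact fun _ _ _ => get2_set2_self n ch u v hWF hun hvn
  · refine ⟨(ch, qq), by rw [if_neg hif], hWF, hS, hF, fun a b hab => hab,
      fun a b hab => Or.inl hab, fun p hp => Or.inl hp, fun p hp => hp, ?_⟩
    intro hun hvn hg
    cases hb : get2 ch u v with
    | false => exact absurd ⟨huvC hun hvn, by rw [hc]; simp [hun, hvn, hg], hb⟩ hif
    | true => rfl

lemma bfsStep_inv (n : Nat) (g : Nat → Nat → Bool) (cango : Grid)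
    (hc : ∀ u v, get2 cango u v = (decide (u < n) && decide (v < n) && g u v))
    (ch : Grid) (qq : List (Nat × Nat)) (p : Nat × Nat) (k : Nat)
    (hWF : WF n ch) (hS : Sound n g ch) (hF : Front ch qq (k + 1))
    (hp : get2 ch p.1 p.2 = true) (hk : p.1 + p.2 = k) :
    WF n (bfsStep n cango (ch, qq) p).1 ∧
    Sound n g (bfsStep n cango (ch, qq) p).1 ∧
    Front (bfsStep n cango (ch, qq) p).1 (bfsStep n cango (ch, qq) p).2 (k + 1) ∧
    (∀ a b, get2 ch a b = true → get2 (bfsStep n cango (ch, qq) p).1 a b = true) ∧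
    (∀ a b, get2 (bfsStep n cango (ch, qq) p).1 a b = true →
      get2 ch a b = true ∨ (a, b) ∈ (bfsStep n cango (ch, qq) p).2) ∧
    (∀ p' ∈ (bfsStep n cango (ch, qq) p).2, p' ∈ qq ∨ p' = (p.1 + 1, p.2) ∨ p' = (p.1, p.2 + 1)) ∧
    (∀ p' ∈ qq, p' ∈ (bfsStep n cango (ch, qq) p).2) ∧
    closedAt n g (bfsStep n cango (ch, qq) p).1 p.1 p.2 := by
  have hpb := hS p.1 p.2 hp
  obtain ⟨res1, he1, hWF1, hS1, hF1, hmono1, hback1, horig1, hsub1, hguar1⟩ :=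
    visit_aux n g cango hc ch qq (p.1 + 1) p.2 k (p.1 + 1 < n)
      (fun hC => ⟨hC, hpb.2.1⟩) (fun h1 _ => h1) hWF hS hF (by omega)
      (fun _ _ hg => rf_succ_x g p.1 p.2 hpb.2.2 hg)
  obtain ⟨res2, he2, hWF2, hS2, hF2, hmono2, hback2, horig2, hsub2, hguar2⟩ :=
    visit_aux n g cango hc res1.1 res1.2 p.1 (p.2 + 1) k (p.2 + 1 < n)
      (fun hC => ⟨hpb.1, hC⟩) (fun _ h2 => h2) hWF1 hS1 hF1 (by omega)
      (fun _ _ hg => rf_succ_y g p.1 p.2 hpb.2.2 hg)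
  have hstep : bfsStep n cango (ch, qq) p = res2 := by
    unfold bfsStep
    dsimp only
    rw [he1, he2]
  rw [hstep]
  refine ⟨hWF2, hS2, hF2, fun a b hab => hmono2 a b (hmono1 a b hab), ?_, ?_, ?_, ?_⟩
  · intro a b hab
    rcases hback2 a b hab with h1 | h1
    · rcases hback1 a b h1 with h2 | h2
      · exact Or.inl h2
      · exact Or.inr (hsub2 _ h2)
    · exact Or.inr h1
  · intro p' hp'
    rcases horig2 p' hp' with h1 | h1
    · rcases horig1 p' h1 with h2 | h2
      · exact Or.inl h2
      · exact Or.inr (Or.inl h2)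
    · exact Or.inr (Or.inr h1)
  · exact fun p' hp' => hsub2 _ (hsub1 _ hp')
  · exact ⟨fun h1 h2 => hmono2 _ _ (hguar1 h1 hpb.2.1 h2), fun h1 h2 => hguar2 hpb.1 h1 h2⟩

lemma wave_inv (n : Nat) (g : Nat → Nat → Bool) (cango : Grid)
    (hc : ∀ u v, get2 cango u v = (decide (u < n) && decide (v < n) && g u v)) (k : Nat) :
    ∀ (l : List (Nat × Nat)) (ch : Grid) (qq : List (Nat × Nat)),
    WF n ch → Sound n g ch → get2 ch 0 0 = true →
    (∀ p ∈ l, get2 ch p.1 p.2 = true ∧ p.1 + p.2 = k) →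
    Front ch qq (k + 1) →
    (∀ x y, get2 ch x y = true → (x, y) ∉ l → (x, y) ∉ qq → closedAt n g ch x y) →
    WF n (l.foldl (bfsStep n cango) (ch, qq)).1 ∧
    Sound n g (l.foldl (bfsStep n cango) (ch, qq)).1 ∧
    get2 (l.foldl (bfsStep n cango) (ch, qq)).1 0 0 = true ∧
    Front (l.foldl (bfsStep n cango) (ch, qq)).1 (l.foldl (bfsStep n cango) (ch, qq)).2 (k + 1) ∧
    (∀ x y, get2 (l.foldl (bfsStep n cango) (ch, qq)).1 x y = true →
      (x, y) ∉ (l.foldl (bfsStep n cango) (ch, qq)).2 →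
      closedAt n g (l.foldl (bfsStep n cango) (ch, qq)).1 x y) := by
  intro l
  induction l with
  | nil =>
    intro ch qq hWF hS h00 hpend hF hcl
    simp only [List.foldl_nil]
    exact ⟨hWF, hS, h00, hF, fun x y hxy hnot => hcl x y hxy (by simp) hnot⟩
  | cons p l ih =>
    intro ch qq hWF hS h00 hpend hF hcl
    obtain ⟨hWF1, hS1, hF1, hmono1, hback1, horig1, hsub1, hclp⟩ :=
      bfsStep_inv n g cango hc ch qq p k hWF hS hF
        (hpend p (List.mem_cons_self)).1 (hpend p (List.mem_cons_self)).2
    rw [List.foldl_cons]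
    have hpend' : ∀ p' ∈ l, get2 (bfsStep n cango (ch, qq) p).1 p'.1 p'.2 = true ∧
        p'.1 + p'.2 = k := fun p' hp' =>
      ⟨hmono1 _ _ (hpend p' (List.mem_cons_of_mem _ hp')).1,
        (hpend p' (List.mem_cons_of_mem _ hp')).2⟩
    have hcl' : ∀ x y, get2 (bfsStep n cango (ch, qq) p).1 x y = true → (x, y) ∉ l →
        (x, y) ∉ (bfsStep n cango (ch, qq) p).2 →
        closedAt n g (bfsStep n cango (ch, qq) p).1 x y := by
      intro x y hxy hnl hnq2
      rcases hback1 x y hxy with hch | hin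
      · by_cases hxyp : (x, y) = p
        · have hx1 : p.1 = x := by rw [← hxyp]
          have hx2 : p.2 = y := by rw [← hxyp]
          rw [← hx1, ← hx2]
          exact hclp
        · have hnotq : (x, y) ∉ qq := fun hq => hnq2 (hsub1 _ hq)
          refine closedAt_mono n g ch _ x y hmono1 (hcl x y hch ?_ hnotq)
          rw [List.mem_cons]
          exact fun hor => hor.elim hxyp hnl
      · exact absurd hin hnq2
    exact ih (bfsStep n cango (ch, qq) p).1 (bfsStep n cango (ch, qq) p).2
      hWF1 hS1 (hmono1 0 0 h00) hpend' hF1 hcl'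

lemma bfsLoop_spec (n : Nat) (g : Nat → Nat → Bool) (cango : Grid)
    (hc : ∀ u v, get2 cango u v = (decide (u < n) && decide (v < n) && g u v)) :
    ∀ (fuel k : Nat) (ch : Grid) (q : List (Nat × Nat)),
    2 * n ≤ fuel + k + 1 → WF n ch → Sound n g ch → get2 ch 0 0 = true →
    Front ch q k →
    (∀ x y, get2 ch x y = true → (x, y) ∉ q → closedAt n g ch x y) →
    Sound n g (bfsLoop n cango fuel ch q) ∧
    get2 (bfsLoop n cango fuel ch q) 0 0 = true ∧
    (∀ x y, get2 (bfsLoop n cango fuel ch q) x y = true →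
      closedAt n g (bfsLoop n cango fuel ch q) x y) := by
  intro fuel
  induction fuel with
  | zero =>
    intro k ch q hfuel hWF hS h00 hF hcl
    have hq : q = [] := by
      cases q with
      | nil => rfl
      | cons p q' =>
        exfalso
        have h1 := hF p (List.mem_cons_self)
        obtain ⟨ha, hb, -⟩ := hS p.1 p.2 h1.1
        have h2 := h1.2
        omega
    subst hq
    exact ⟨hS, h00, fun x y hxy => hcl x y hxy (by simp)⟩
  | succ fuel ih =>
    intro k ch q hfuel hWF hS h00 hF hcl
    by_cases hq : q = []
    · subst hq
      simp only [bfsLoop, List.isEmpty_nil, if_true]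
      exact ⟨hS, h00, fun x y hxy => hcl x y hxy (by simp)⟩
    · obtain ⟨hWFs, hSs, h00s, hFs, hcls⟩ :=
        wave_inv n g cango hc k q ch [] hWF hS h00 hF (fun p hp => by simp at hp)
          (fun x y hxy hnq _ => hcl x y hxy hnq)
      have hrec := ih (k + 1) (q.foldl (bfsStep n cango) (ch, [])).1
        (q.foldl (bfsStep n cango) (ch, [])).2 (by omega) hWFs hSs h00s hFs hcls
      have hne : ¬ (q.isEmpty = true) := by simp [hq]
      simp only [bfsLoop, if_neg hne]
      exact hrec

lemma closed_complete (n : Nat) (g : Nat → Nat → Bool) (F : Grid)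
    (h00 : get2 F 0 0 = true)
    (hcl : ∀ x y, get2 F x y = true → closedAt n g F x y) :
    ∀ x y, x < n → y < n → rf g x y = true → get2 F x y = true := by
  have key : ∀ s x y, x + y = s → x < n → y < n → rf g x y = true → get2 F x y = true := by
    intro s
    induction s using Nat.strong_induction_on with
    | _ s ih =>
      intro x y hs hx hy hr
      cases x with
      | zero =>
        cases y with
        | zero => exact h00
        | succ j =>
          simp only [rf, Bool.and_eq_true] at hr
          have hchk := ih (0 + j) (by omega) 0 j rfl hx (by omega) hr.2
          exact (hcl 0 j hchk).2 (by omega) hr.1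
      | succ i =>
        cases y with
        | zero =>
          simp only [rf, Bool.and_eq_true] at hr
          have hchk := ih (i + 0) (by omega) i 0 rfl (by omega) hy hr.2
          exact (hcl i 0 hchk).1 (by omega) hr.1
        | succ j =>
          simp only [rf, Bool.and_eq_true, Bool.or_eq_true] at hr
          rcases hr.2 with h2 | h2
          · have hchk := ih (i + (j + 1)) (by omega) i (j + 1) rfl (by omega) hy h2
            exact (hcl i (j + 1) hchk).1 (by omega) hr.1
          · have hchk := ih ((i + 1) + j) (by omega) (i + 1) j rfl hx (by omega) h2
            exact (hcl (i + 1) j hchk).2 (by omega) hr.1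
  exact fun x y hx hy hr => key (x + y) x y rfl hx hy hr

lemma bfs_corner (n : Nat) (g : Nat → Nat → Bool) (cango : Grid) (hn : 0 < n)
    (hc : ∀ u v, get2 cango u v = (decide (u < n) && decide (v < n) && g u v))
    (h00 : g 0 0 = true) :
    get2 (bfsLoop n cango (2 * n)
        (set2 (List.replicate n (List.replicate n false)) 0 0) [(0, 0)]) (n - 1) (n - 1) =
      rf g (n - 1) (n - 1) := by
  have hWFr := WF_replicate n
  have hWF0 : WF n (set2 (List.replicate n (List.replicate n false)) 0 0) :=
    WF_set2 n _ 0 0 hWFr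
  have h00c : get2 (set2 (List.replicate n (List.replicate n false)) 0 0) 0 0 = true :=
    get2_set2_self n _ 0 0 hWFr hn hn
  have honly : ∀ x y, get2 (set2 (List.replicate n (List.replicate n false)) 0 0) x y = true →
      x = 0 ∧ y = 0 := by
    intro x y h
    by_contra hne
    rw [get2_set2_ne _ 0 0 x y hne, get2_replicate] at h
    cases h
  have hSound : Sound n g (set2 (List.replicate n (List.replicate n false)) 0 0) := by
    intro x y h
    obtain ⟨rfl, rfl⟩ := honly x y h
    refine ⟨hn, hn, ?_⟩
    show rf g 0 0 = true
    simp [rf, h00]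
  have hFront : Front (set2 (List.replicate n (List.replicate n false)) 0 0) [(0, 0)] 0 := by
    intro p hp
    have : p = (0, 0) := by simpa using hp
    subst this
    exact ⟨h00c, rfl⟩
  have hcl : ∀ x y, get2 (set2 (List.replicate n (List.replicate n false)) 0 0) x y = true →
      (x, y) ∉ [((0 : Nat), (0 : Nat))] →
      closedAt n g (set2 (List.replicate n (List.replicate n false)) 0 0) x y := by
    intro x y h hn2
    obtain ⟨rfl, rfl⟩ := honly x y h
    exact absurd (by simp) hn2
  obtain ⟨hSF, h00F, hclF⟩ := bfsLoop_spec n g cango hc (2 * n) 0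
    (set2 (List.replicate n (List.replicate n false)) 0 0) [(0, 0)]
    (by omega) hWF0 hSound h00c hFront hcl
  cases hv : get2 (bfsLoop n cango (2 * n)
      (set2 (List.replicate n (List.replicate n false)) 0 0) [(0, 0)]) (n - 1) (n - 1) with
  | true => exact ((hSF _ _ hv).2.2).symm
  | false =>
    cases hr : rf g (n - 1) (n - 1) with
    | false => rfl
    | true =>
      have := closed_complete n g _ h00F hclF (n - 1) (n - 1) (by omega) (by omega) hr
      rw [hv] at this
      cases this

lemma rf_step (n : Nat) (g : Nat → Nat → Bool) (m : Nat) (up left : Bool)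
    (hup : 0 < m / n → up = rf g (m / n - 1) (m % n))
    (hleft : 0 < m % n → left = rf g (m / n) (m % n - 1)) :
    (g (m / n) (m % n) && ((m == 0) || (decide (0 < m / n) && up) ||
      (decide (0 < m % n) && left))) = rf g (m / n) (m % n) := by
  have hdm := Nat.div_add_mod m n
  rcases hi : m / n with _ | t <;> rcases hj : m % n with _ | s
  · have hm0 : m = 0 := by
      rw [hi, hj] at hdm
      omega
    subst hm0
    simp [rf]
  · have hm0 : ¬ (m = 0) := by
      intro h
      subst h
      rw [Nat.zero_mod] at hj
      cases hj
    have hl := hleft (by omega)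
    rw [hi, hj] at hl
    simp only [Nat.add_sub_cancel] at hl
    have hb : (m == 0) = false := beq_eq_false_iff_ne.2 hm0
    simp [rf, hl, hb]
  · have hm0 : ¬ (m = 0) := by
      intro h
      subst h
      rw [Nat.zero_div] at hi
      cases hi
    have hu := hup (by omega)
    rw [hi, hj] at hu
    simp only [Nat.add_sub_cancel] at hu
    have hb : (m == 0) = false := beq_eq_false_iff_ne.2 hm0
    simp [rf, hu, hb]
  · have hm0 : ¬ (m = 0) := by
      intro h
      subst h
      rw [Nat.zero_div] at hi
      cases hi
    have hu := hup (by omega)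
    have hl := hleft (by omega)
    rw [hi, hj] at hu hl
    simp only [Nat.add_sub_cancel] at hu hl
    have hb : (m == 0) = false := beq_eq_false_iff_ne.2 hm0
    simp [rf, hu, hl, hb]

lemma reach_aux (n : Nat) (A : List Int) (a : Int) (hn : 0 < n) : ∀ m, m ≤ n * n →
    ((List.range m).foldl (altStep n A a) []).length = m ∧
    ∀ idx, idx < m → ((List.range m).foldl (altStep n A a) []).getD idx false =
      rf (gdiv n A a) (idx / n) (idx % n) := by
  intro m
  induction m with
  | zero => exact fun _ => ⟨rfl, fun idx h => absurd h (by omega)⟩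
  | succ m ih =>
    intro hm
    obtain ⟨ihlen, ihget⟩ := ih (by omega)
    rw [List.range_succ, List.foldl_append, List.foldl_cons, List.foldl_nil]
    have hlen : (altStep n A a ((List.range m).foldl (altStep n A a) []) m).length = m + 1 := by
      simp [altStep, ihlen]
    refine ⟨hlen, ?_⟩
    intro idx hidx
    by_cases hlt : idx < m
    · have hkeep : (altStep n A a ((List.range m).foldl (altStep n A a) []) m).getD idx false =
          ((List.range m).foldl (altStep n A a) []).getD idx false := by
        simp only [altStep]
        rw [List.getD_eq_getElem?_getD, List.getElem?_append_left (by omega),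
          ← List.getD_eq_getElem?_getD]
      rw [hkeep, ihget idx hlt]
    · have hie : idx = m := by omega
      subst hie
      have hok : (altStep n A a ((List.range idx).foldl (altStep n A a) []) idx).getD idx false =
          (decide (PySem.Int.mod ((PySem.List.pyGet? A ((idx : Nat) : Int)).getD 0) a = 0) &&
            ((idx == 0) ||
              (decide (0 < idx / n) &&
                ((List.range idx).foldl (altStep n A a) []).getD (idx - n) false) ||
              (decide (0 < idx % n) &&
                ((List.range idx).foldl (altStep n A a) []).getD (idx - 1) false))) := by
        simp only [altStep]
        rw [List.getD_eq_getElem?_getD, List.getElem?_append_right (by omega)]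
        simp [ihlen]
      rw [hok]
      have hdm := Nat.div_add_mod idx n
      have hmod : idx % n < n := Nat.mod_lt _ hn
      have hgd : decide (PySem.Int.mod ((PySem.List.pyGet? A ((idx : Nat) : Int)).getD 0) a = 0)
          = gdiv n A a (idx / n) (idx % n) := by
        unfold gdiv
        have : idx / n * n + idx % n = idx := by rw [Nat.mul_comm]; exact hdm
        rw [this]
      rw [hgd]
      apply rf_step n (gdiv n A a) idx
      · intro hpos
        obtain ⟨t, ht⟩ : ∃ t, idx / n = t + 1 := ⟨idx / n - 1, by omega⟩
        have hnt : n * t + n + idx % n = idx := by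
          rw [ht, Nat.mul_succ] at hdm
          omega
        have hsub : idx - n = n * t + idx % n := by omega
        have hge : n ≤ idx := by omega
        have hdiv : (idx - n) / n = t := by
          rw [hsub, Nat.mul_add_div hn, Nat.div_eq_of_lt hmod]
          omega
        have hmod' : (idx - n) % n = idx % n := by
          rw [hsub, Nat.mul_add_mod, Nat.mod_eq_of_lt hmod]
        rw [ihget (idx - n) (by omega), hdiv, hmod', ht]
        simp
      · intro hpos
        have hpos0 : 0 < idx := by
          by_contra h
          have : idx = 0 := by omega
          subst this
          rw [Nat.zero_mod] at hpos
          omega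
        have hsub : idx - 1 = n * (idx / n) + (idx % n - 1) := by omega
        have h0 : (idx % n - 1) / n = 0 := Nat.div_eq_of_lt (by omega)
        have hdiv : (idx - 1) / n = idx / n := by
          rw [hsub, Nat.mul_add_div hn, h0]
          omega
        have h2 : (idx % n - 1) % n = idx % n - 1 := Nat.mod_eq_of_lt (by omega)
        have hmod' : (idx - 1) % n = idx % n - 1 := by
          rw [hsub, Nat.mul_add_mod, h2]
        rw [ihget (idx - 1) (by omega), hdiv, hmod']

lemma reach_corner (n : Nat) (A : List Int) (a : Int) (hn : 0 < n) :
    (PySem.List.pyGet? ((List.range (n * n)).foldl (altStep n A a) []) (-1)).getD false =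
      rf (gdiv n A a) (n - 1) (n - 1) := by
  obtain ⟨hlen, hget⟩ := reach_aux n A a hn (n * n) le_rfl
  have hne : ((List.range (n * n)).foldl (altStep n A a) []) ≠ [] := by
    intro h
    rw [h] at hlen
    simp at hlen
    have := Nat.mul_pos hn hn
    omega
  rw [PySem.List.pyGet?_neg_one, List.getLast?_eq_getElem?]
  have hidx : n * n - 1 < n * n := by
    have : 0 < n * n := Nat.mul_pos hn hn
    omega
  rw [hlen]
  have := hget (n * n - 1) hidx
  rw [List.getD_eq_getElem?_getD] at this
  rw [this]
  obtain ⟨t, rfl⟩ : ∃ t, n = t + 1 := ⟨n - 1, by omega⟩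
  have h1 : (t + 1) * (t + 1) - 1 = (t + 1) * t + t := by
    rw [Nat.mul_succ]
    omega
  have hdiv : ((t + 1) * (t + 1) - 1) / (t + 1) = t := by
    rw [h1, Nat.mul_add_div (by omega)]
    rw [Nat.div_eq_of_lt (by omega)]
    omega
  have hmod : ((t + 1) * (t + 1) - 1) % (t + 1) = t := by
    rw [h1, Nat.mul_add_mod, Nat.mod_eq_of_lt (by omega)]
  rw [hdiv, hmod]
  simp

lemma body_eq (N : Int) (A : List Int) (hN : 1 ≤ N) :
    ∀ ans a, bodyA N A ans a = bodyB N A ans a := by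
  intro ans a
  have hn : 0 < N.toNat := by omega
  simp only [bodyA, bodyB]
  rw [reach_corner N.toNat A a hn]
  have hg00 : get2 (buildCango N.toNat A a) 0 0 = gdiv N.toNat A a 0 0 := by
    rw [get2_buildCango]
    simp [hn]
  have hgc : get2 (buildCango N.toNat A a) (N.toNat - 1) (N.toNat - 1) =
      gdiv N.toNat A a (N.toNat - 1) (N.toNat - 1) := by
    rw [get2_buildCango]
    simp [(by omega : N.toNat - 1 < N.toNat)]
  by_cases h00 : gdiv N.toNat A a 0 0 = true
  · by_cases hcor : gdiv N.toNat A a (N.toNat - 1) (N.toNat - 1) = true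
    · rw [bfs_corner N.toNat (gdiv N.toNat A a) (buildCango N.toNat A a) hn
        (get2_buildCango N.toNat A a) h00]
      rw [if_neg (by simp [hg00, hgc, h00, hcor])]
    · rw [if_pos (Or.inr (by simp [hgc, hcor]))]
      cases hr : rf (gdiv N.toNat A a) (N.toNat - 1) (N.toNat - 1) with
      | false => rw [if_neg (by simp)]
      | true => exact absurd (rf_g _ _ _ hr) hcor
  · rw [if_pos (Or.inl (by simp [hg00, h00]))]
    cases hr : rf (gdiv N.toNat A a) (N.toNat - 1) (N.toNat - 1) with
    | false => rw [if_neg (by simp)]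
    | true => exact absurd (rf_root _ _ _ hr) h00

-- ===== VERDICT (by name: the statement is the Claim_ definition above) =====
theorem largestGCD_spec : Claim_equal_largestGCD := by
  intro N A _ hPre
  unfold Spec_largestGCD largestGCD largestGCD_alt
  apply PySem.List.foldl_congr_mem
  intro acc x _
  exact body_eq N A hPre.1 acc x
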